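-- pv_equiv track=rewrite | github.com/tcpiplab/Instability | network_diagnostics.py | is_private_ip
-- ===== SOURCE A (Python) =====
-- def is_private_ip(ip: str) -> bool:
--     """Check if an IP address is in RFC 1918 private address space"""
--     try:
--         import ipaddress
--         ip_obj = ipaddress.IPv4Address(ip)
--
--         # RFC 1918 private address ranges:
--         # 10.0.0.0/8 (10.0.0.0 to 10.255.255.255)
--         # 172.16.0.0/12 (172.16.0.0 to 172.31.255.255)
--         # 192.168.0.0/16 (192.168.0.0 to 192.168.255.255)
--         private_networks = [
--             ipaddress.IPv4Network('10.0.0.0/8'),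
--             ipaddress.IPv4Network('172.16.0.0/12'),
--             ipaddress.IPv4Network('192.168.0.0/16')
--         ]
--
--         return any(ip_obj in network for network in private_networks)
--     except Exception:
--         return False
-- ===== SOURCE B (Python) =====
-- def is_private_ip(ip: str) -> bool:
--     """Check if an IP address is in RFC 1918 private address space"""
--     # Single left-to-right scan: a tiny state machine over the characters,
--     # tracking dot count, current octet value, and the first two octets.
--     idx = 0          # dots seen so far
--     seen = False     # current octet has at least one digit
--     val = 0          # value of the current octet
--     a = b = 0        # first and second octet
--     for ch in ip:
--         if ch == '.':
--             if not seen or idx == 3: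
--                 return False
--             if idx == 0:
--                 a = val
--             elif idx == 1:
--                 b = val
--             idx += 1
--             seen = False
--             val = 0
--         elif '0' <= ch <= '9':
--             if seen and val == 0:
--                 return False        # leading zero ("0X...")
--             val = val * 10 + (ord(ch) - 48)
--             if val > 255:
--                 return False
--             seen = True
--         else:
--             return False
--     if not seen or idx != 3:
--         return False
--     return a == 10 or (a == 172 and 16 <= b <= 31) or (a == 192 and b == 168)
-- ===== Notes on version B (the rewrite author's own statement) =====
-- stated objective: alternative
-- what changed: B replaces A's parse-the-whole-address-then-test-membership-in-three-IPv4Network-ranges with a single left-to-right character state machine (dot count, current octet value, first two octets) that exits early on any bad character and never builds the 32-bit address.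
import Mathlib
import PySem

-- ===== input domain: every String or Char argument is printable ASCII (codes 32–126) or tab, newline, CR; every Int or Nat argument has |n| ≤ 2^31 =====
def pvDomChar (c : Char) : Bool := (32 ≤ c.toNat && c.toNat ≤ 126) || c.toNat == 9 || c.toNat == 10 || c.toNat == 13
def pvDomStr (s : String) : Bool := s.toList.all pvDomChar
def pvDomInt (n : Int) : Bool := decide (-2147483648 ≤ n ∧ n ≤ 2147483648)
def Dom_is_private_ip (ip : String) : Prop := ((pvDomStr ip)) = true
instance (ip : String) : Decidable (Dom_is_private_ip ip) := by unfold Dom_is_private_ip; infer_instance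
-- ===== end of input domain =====

-- B replaces A's parse-to-address-object plus `any` over three IPv4Network ranges by a
-- single left-to-right character state machine with early exit (simpler, one pass, no split).

-- ===== PORT A =====
-- A: ipaddress.IPv4Address(ip) (dotted quad: 4 octets, ASCII digits, no leading zeros,
-- each ≤ 255; exception → False), then `any(ip_obj in network for ...)` over the three
-- RFC 1918 networks; `in network` is network_address ≤ ip ≤ broadcast_address.
-- One dotted-quad octet (exactly ipaddress._parse_octet's acceptance set on strings):
def pvOctet? (cs : List Char) : Option Nat :=
  if cs ≠ [] ∧ cs.all Char.isDigit ∧ (cs.length = 1 ∨ cs.headD '0' ≠ '0')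
      ∧ cs.foldl (fun acc c => acc * 10 + (c.toNat - 48)) 0 ≤ 255
  then some (cs.foldl (fun acc c => acc * 10 + (c.toNat - 48)) 0) else none

-- IPv4Address(ip) as an integer; none = ipaddress raises AddressValueError.
def pvIPv4? (ip : String) : Option Nat :=
  match PySem.Chars.splitOn ip.toList ['.'] with
  | [p1, p2, p3, p4] =>
    match pvOctet? p1, pvOctet? p2, pvOctet? p3, pvOctet? p4 with
    | some a, some b, some c, some d => some (((a * 256 + b) * 256 + c) * 256 + d)
    | _, _, _, _ => none
  | _ => none

def is_private_ip (ip : String) : Bool :=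
  match pvIPv4? ip with
  | none => false
  | some n =>
    [(167772160, 184549375), (2886729728, 2887778303), (3232235520, 3232301055)].any
      (fun net => decide (net.1 ≤ n ∧ n ≤ net.2))

-- ===== PORT B =====
-- B: one pass over the characters; state = (dots seen, current-octet-nonempty, current
-- octet value, first octet a, second octet b); any bad character/shape exits with false.
def pvScanB : List Char → Nat → Bool → Nat → Nat → Nat → Bool
  | [], idx, seen, _val, a, b =>
    if seen = false ∨ idx ≠ 3 then false
    else decide (a = 10 ∨ (a = 172 ∧ 16 ≤ b ∧ b ≤ 31) ∨ (a = 192 ∧ b = 168))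
  | c :: cs, idx, seen, val, a, b =>
    if c = '.' then
      if seen = false ∨ idx = 3 then false
      else pvScanB cs (idx + 1) false 0 (if idx = 0 then val else a) (if idx = 1 then val else b)
    else if '0' ≤ c ∧ c ≤ '9' then
      if seen = true ∧ val = 0 then false        -- leading zero
      else if val * 10 + (c.toNat - 48) > 255 then false
      else pvScanB cs idx true (val * 10 + (c.toNat - 48)) a b
    else false

def is_private_ip_alt (ip : String) : Bool :=
  pvScanB ip.toList 0 false 0 0 0

-- ===== PRECONDITION & SPEC =====
def Spec_is_private_ip (ip : String) (out : Bool) : Prop := out = is_private_ip_alt ip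
instance (ip : String) (out : Bool) : Decidable (Spec_is_private_ip ip out) := by unfold Spec_is_private_ip; infer_instance

-- ===== CLAIM (what is proved, stated in full; the proofs are below) =====
def Claim_equal_is_private_ip : Prop := ∀ (ip : String), Dom_is_private_ip ip → Spec_is_private_ip ip (is_private_ip ip)

-- ===== LEMMAS AND PROOFS =====

-- Structural re-statement of PySem.Chars.splitOn on a single-char separator.
def pvSplit : List Char → List Char → List (List Char)
  | pre, [] => [pre]
  | pre, c :: rest => if c = '.' then pre :: pvSplit [] rest else pvSplit (pre ++ [c]) rest

def pvUnsplit : List (List Char) → List Char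
  | [] => []
  | [p] => p
  | p :: ps => p ++ '.' :: pvUnsplit ps

theorem pvSplit_ne_nil (pre cs : List Char) : pvSplit pre cs ≠ [] := by
  induction cs generalizing pre with
  | nil => simp [pvSplit]
  | cons c rest ih =>
    unfold pvSplit; split
    · simp
    · exact ih _

theorem pvUnsplit_pvSplit (cs pre : List Char) : pvUnsplit (pvSplit pre cs) = pre ++ cs := by
  induction cs generalizing pre with
  | nil => simp [pvSplit, pvUnsplit]
  | cons c rest ih =>
    unfold pvSplit; split
    · rename_i hc
      subst hc
      rcases h : pvSplit [] rest with _ | ⟨q, qs⟩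
      · exact absurd h (pvSplit_ne_nil _ _)
      · have := ih ([] : List Char); rw [h] at this
        simp only [pvUnsplit]
        simpa using this
    · rw [ih]; simp

theorem pvSplit_dotfree (cs pre : List Char) (hpre : '.' ∉ pre) :
    ∀ p ∈ pvSplit pre cs, '.' ∉ p := by
  induction cs generalizing pre with
  | nil => simpa [pvSplit] using hpre
  | cons c rest ih =>
    unfold pvSplit; split
    · intro p hp
      rcases List.mem_cons.mp hp with h | h
      · subst h; exact hpre
      · exact ih [] (by simp) p h
    · rename_i hc
      exact ih (pre ++ [c]) (by simp [hpre, Ne.symm hc]) 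

theorem pvGo_nil (f : Nat) (cur : List Char) (acc : List (List Char)) :
    PySem.Chars.splitOn.go ['.'] (f + 1) [] cur acc = (cur.reverse :: acc).reverse := by
  rw [PySem.Chars.splitOn.go]
  omega

theorem pvGo_cons (f : Nat) (c : Char) (rest cur : List Char) (acc : List (List Char)) :
    PySem.Chars.splitOn.go ['.'] (f + 1) (c :: rest) cur acc =
      if c = '.' then PySem.Chars.splitOn.go ['.'] f rest [] (cur.reverse :: acc)
      else PySem.Chars.splitOn.go ['.'] f rest (c :: cur) acc := by
  rw [PySem.Chars.splitOn.go]
  · simp only [List.isPrefixOf_cons₂, List.isPrefixOf_nil_left, Bool.and_true, beq_iff_eq,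
      List.length_singleton, List.drop_one, List.tail_cons]
    by_cases hc : c = '.'
    · rw [if_pos (by simp [hc]), if_pos hc]
    · rw [if_neg (fun h => hc h.symm), if_neg hc]

theorem splitOn_go_eq (cs : List Char) : ∀ (fuel : Nat) (cur : List Char)
    (acc : List (List Char)), cs.length < fuel →
    PySem.Chars.splitOn.go ['.'] fuel cs cur acc = acc.reverse ++ pvSplit cur.reverse cs := by
  induction cs with
  | nil =>
    intro fuel cur acc hf
    match fuel, hf with
    | f + 1, _ => rw [pvGo_nil]; simp [pvSplit]
  | cons c rest ih =>
    intro fuel cur acc hf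
    match fuel, hf with
    | f + 1, hf =>
      rw [pvGo_cons]
      by_cases hc : c = '.'
      · rw [if_pos hc]
        rw [ih f [] _ (by simpa using hf)]
        simp [pvSplit, hc]
      · rw [if_neg hc]
        rw [ih f (c :: cur) acc (by simpa using hf)]
        simp [pvSplit, hc]

theorem splitOn_eq_pvSplit (cs : List Char) :
    PySem.Chars.splitOn cs ['.'] = pvSplit [] cs := by
  unfold PySem.Chars.splitOn
  rw [splitOn_go_eq cs (cs.length + 1) [] [] (by omega)]
  simp

-- Current-octet consumption, mirroring pvScanB's digit branch.
def pvOctC : List Char → Bool → Nat → Option (Bool × Nat)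
  | [], seen, val => some (seen, val)
  | c :: cs, seen, val =>
    if c = '.' then none
    else if '0' ≤ c ∧ c ≤ '9' then
      if seen = true ∧ val = 0 then none
      else if val * 10 + (c.toNat - 48) > 255 then none
      else pvOctC cs true (val * 10 + (c.toNat - 48))
    else none

theorem pvIsDigit_iff (c : Char) : c.isDigit = true ↔ ('0' ≤ c ∧ c ≤ '9') := by
  simp [Char.isDigit]
  constructor
  · intro h; exact ⟨h.1, h.2⟩
  · intro h; exact ⟨h.1, h.2⟩

theorem pvCharEq48 (c : Char) (he : c.toNat = 48) : c = '0' :=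
  Char.ext (UInt32.toNat_inj.mp he)

theorem pvScanB_append (p : List Char) (hp : '.' ∉ p) :
    ∀ (rest : List Char) (idx : Nat) (seen : Bool) (val a b : Nat),
    pvScanB (p ++ rest) idx seen val a b =
      match pvOctC p seen val with
      | none => false
      | some (s, v) => pvScanB rest idx s v a b := by
  induction p with
  | nil => intro rest idx seen val a b; simp [pvOctC]
  | cons c cs ih =>
    intro rest idx seen val a b
    have hc : ¬ c = '.' := fun h => hp (h ▸ List.mem_cons_self ..)
    simp only [List.cons_append, pvScanB, pvOctC, if_neg hc]
    by_cases hdig : '0' ≤ c ∧ c ≤ '9'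
    · simp only [if_pos hdig]
      by_cases hlz : seen = true ∧ val = 0
      · simp only [if_pos hlz]
      · simp only [if_neg hlz]
        by_cases hbig : val * 10 + (c.toNat - 48) > 255
        · simp only [if_pos hbig]
        · simp only [if_neg hbig]
          exact ih (fun h => hp (List.mem_cons_of_mem _ h)) rest idx true _ a b
    · simp only [if_neg hdig]

def pvFval (cs : List Char) (x : Nat) : Nat :=
  cs.foldl (fun acc c => acc * 10 + (c.toNat - 48)) x

theorem pvFval_le (cs : List Char) : ∀ x : Nat, x ≤ pvFval cs x := by
  induction cs with
  | nil => intro x; simp [pvFval]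
  | cons c cs ih =>
    intro x
    have h1 : x ≤ x * 10 + (c.toNat - 48) := by omega
    exact le_trans h1 (ih _)

theorem pvOctC_pos (p : List Char) : ∀ val : Nat, 1 ≤ val → val ≤ 255 →
    pvOctC p true val =
      if p.all Char.isDigit ∧ pvFval p val ≤ 255 then some (true, pvFval p val) else none := by
  induction p with
  | nil =>
    intro val h1 h2
    rw [pvOctC, if_pos (by simpa [pvFval] using h2)]
    simp [pvFval]
  | cons c cs ih =>
    intro val h1 h2
    by_cases hdig : '0' ≤ c ∧ c ≤ '9'
    · have hc : ¬ c = '.' := by rintro rfl; exact absurd hdig (by decide)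
      rw [pvOctC, if_neg hc, if_pos hdig, if_neg (by omega)]
      have hfv : pvFval (c :: cs) val = pvFval cs (val * 10 + (c.toNat - 48)) := rfl
      by_cases hbig : val * 10 + (c.toNat - 48) > 255
      · rw [if_pos hbig, if_neg]
        rintro ⟨-, hle⟩
        have := pvFval_le cs (val * 10 + (c.toNat - 48))
        rw [hfv] at hle
        omega
      · rw [if_neg hbig, ih _ (by omega) (by omega)]
        have hcd : c.isDigit = true := (pvIsDigit_iff c).mpr hdig
        simp [hcd, hfv]
    · have hnd : ¬ c.isDigit = true := fun h => hdig ((pvIsDigit_iff c).mp h)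
      rw [pvOctC]
      by_cases hc : c = '.'
      · rw [if_pos hc, if_neg (by simp [hnd])]
      · rw [if_neg hc, if_neg hdig, if_neg (by simp [hnd])]

theorem pvOctC_eq_pvOctet? (p : List Char) :
    pvOctC p false 0 =
      match pvOctet? p with
      | some v => some (true, v)
      | none => if p = [] then some (false, 0) else none := by
  rcases p with - | ⟨c, cs⟩
  · simp [pvOctC, pvOctet?]
  · by_cases hdig : '0' ≤ c ∧ c ≤ '9'
    · have hc : ¬ c = '.' := by rintro rfl; exact absurd hdig (by decide)
      have hcd : c.isDigit = true := (pvIsDigit_iff c).mpr hdig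
      have hb1 : 48 ≤ c.toNat := hdig.1
      have hb2 : c.toNat ≤ 57 := hdig.2
      rw [pvOctC, if_neg hc, if_pos hdig, if_neg (by simp), if_neg (by omega)]
      by_cases hz : c = '0'
      · subst hz
        rcases cs with - | ⟨c2, cs2⟩
        · simp [pvOctC, pvOctet?]
        · have hoct : pvOctet? ('0' :: c2 :: cs2) = none := by
            unfold pvOctet?
            rw [if_neg]
            rintro ⟨-, -, h3, -⟩
            rcases h3 with h | h
            · simp at h
            · simp at h
          rw [hoct]
          have h00 : (0 : Nat) * 10 + ('0'.toNat - 48) = 0 := by decide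
          rw [h00, pvOctC]
          by_cases hc2 : c2 = '.'
          · rw [if_pos hc2]; simp
          · rw [if_neg hc2]
            by_cases hd2 : '0' ≤ c2 ∧ c2 ≤ '9'
            · rw [if_pos hd2, if_pos ⟨rfl, rfl⟩]; simp
            · rw [if_neg hd2]; simp
      · have hz' : ¬ c.toNat = 48 := fun he => hz (pvCharEq48 c he)
        have h0 : (0 : Nat) * 10 + (c.toNat - 48) = c.toNat - 48 := by ring
        rw [h0, pvOctC_pos cs (c.toNat - 48) (by omega) (by omega)]
        unfold pvOctet?
        by_cases hcond : cs.all Char.isDigit = true ∧ pvFval cs (c.toNat - 48) ≤ 255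
        · rw [if_pos hcond, if_pos]
          · have : List.foldl (fun acc c => acc * 10 + (c.toNat - 48)) 0 (c :: cs)
                = pvFval cs (c.toNat - 48) := by
              simp [pvFval, List.foldl_cons]
            simp [this]
          · refine ⟨by simp, by simp [hcd, hcond.1], Or.inr (by simpa using hz), ?_⟩
            show List.foldl (fun acc c => acc * 10 + (c.toNat - 48)) 0 (c :: cs) ≤ 255
            have : List.foldl (fun acc c => acc * 10 + (c.toNat - 48)) 0 (c :: cs)
                = pvFval cs (c.toNat - 48) := by
              simp [pvFval, List.foldl_cons]
            rw [this]; exact hcond.2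
        · rw [if_neg hcond, if_neg, if_neg (by simp)]
          rintro ⟨-, hall, -, hle⟩
          simp only [List.all_cons, Bool.and_eq_true] at hall
          refine hcond ⟨hall.2, ?_⟩
          have : List.foldl (fun acc c => acc * 10 + (c.toNat - 48)) 0 (c :: cs)
              = pvFval cs (c.toNat - 48) := by
            simp [pvFval, List.foldl_cons]
          rw [← this]
          exact hle
    · have hnd : ¬ c.isDigit = true := fun h => hdig ((pvIsDigit_iff c).mp h)
      have hoct : pvOctet? (c :: cs) = none := by
        unfold pvOctet?
        rw [if_neg]
        rintro ⟨-, hall, -, -⟩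
        simp only [List.all_cons, Bool.and_eq_true] at hall
        exact hnd hall.1
      rw [hoct, pvOctC]
      by_cases hc : c = '.'
      · rw [if_pos hc]; simp
      · rw [if_neg hc, if_neg hdig]; simp

-- Parts-level restatement of pvScanB.
def pvScanParts : List (List Char) → Nat → Nat → Nat → Bool
  | [], _, _, _ => false
  | [p], idx, a, b =>
    match pvOctet? p with
    | none => false
    | some _ =>
      if idx ≠ 3 then false
      else decide (a = 10 ∨ (a = 172 ∧ 16 ≤ b ∧ b ≤ 31) ∨ (a = 192 ∧ b = 168))
  | p :: q :: ps, idx, a, b =>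
    match pvOctet? p with
    | none => false
    | some v =>
      if idx = 3 then false
      else pvScanParts (q :: ps) (idx + 1) (if idx = 0 then v else a) (if idx = 1 then v else b)

theorem pvScanB_eq_parts (parts : List (List Char)) (hdf : ∀ p ∈ parts, '.' ∉ p) :
    ∀ (idx a b : Nat), parts ≠ [] →
    pvScanB (pvUnsplit parts) idx false 0 a b = pvScanParts parts idx a b := by
  induction parts with
  | nil => intro _ _ _ h; exact absurd rfl h
  | cons p ps ih =>
    intro idx a b _
    have hp : '.' ∉ p := hdf p (List.mem_cons_self ..)
    rcases ps with _ | ⟨q, qs⟩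
    · have hu : pvUnsplit [p] = p ++ [] := by simp [pvUnsplit]
      rw [hu, pvScanB_append p hp, pvOctC_eq_pvOctet? p]
      rcases hoct : pvOctet? p with _ | v
      · by_cases hpe : p = []
        · subst hpe
          simp [pvScanParts, hoct, pvScanB]
        · simp [hpe, pvScanParts, hoct]
      · simp only [pvScanParts, hoct, pvScanB]
        by_cases h3 : idx = 3
        · simp [h3]
        · simp [h3]
    · have hu : pvUnsplit (p :: q :: qs) = p ++ '.' :: pvUnsplit (q :: qs) := rfl
      rw [hu, pvScanB_append p hp, pvOctC_eq_pvOctet? p]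
      rcases hoct : pvOctet? p with _ | v
      · by_cases hpe : p = []
        · subst hpe
          simp [pvScanParts, hoct, pvScanB]
        · simp [hpe, pvScanParts, hoct]
      · simp only [pvScanParts, hoct]
        show pvScanB ('.' :: pvUnsplit (q :: qs)) idx true v a b = _
        by_cases h3 : idx = 3
        · simp [pvScanB, h3]
        · rw [show pvScanB ('.' :: pvUnsplit (q :: qs)) idx true v a b
                = pvScanB (pvUnsplit (q :: qs)) (idx + 1) false 0
                    (if idx = 0 then v else a) (if idx = 1 then v else b) by
              simp [pvScanB, h3],
            if_neg h3]
          exact ih (fun r hr => hdf r (List.mem_cons_of_mem _ hr)) (idx + 1) _ _ (by simp)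

theorem pvOctet?_le {cs : List Char} {v : Nat} (h : pvOctet? cs = some v) : v ≤ 255 := by
  unfold pvOctet? at h
  split at h
  · rename_i hc; cases h; exact hc.2.2.2
  · exact absurd h (by simp)

theorem pvScanParts_short (ps : List (List Char)) :
    ∀ (idx a b : Nat), ps.length + idx ≠ 4 → pvScanParts ps idx a b = false := by
  induction ps with
  | nil => intro idx a b _; rfl
  | cons p ps ih =>
    intro idx a b hlen
    rcases ps with - | ⟨q, qs⟩
    · unfold pvScanParts
      rcases pvOctet? p with - | v
      · rfl
      · simp only
        rw [if_pos]
        simp at hlen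
        omega
    · unfold pvScanParts
      rcases pvOctet? p with - | v
      · rfl
      · simp only
        by_cases h3 : idx = 3
        · rw [if_pos h3]
        · rw [if_neg h3]
          apply ih
          simp at hlen ⊢
          omega

-- ===== VERDICT (by name: the statement is the Claim_ definition above) =====
theorem is_private_ip_spec : Claim_equal_is_private_ip := by
  intro ip _
  unfold Spec_is_private_ip is_private_ip is_private_ip_alt pvIPv4?
  rw [splitOn_eq_pvSplit]
  have hB : pvScanB ip.toList 0 false 0 0 0 = pvScanParts (pvSplit [] ip.toList) 0 0 0 := by
    have := pvScanB_eq_parts (pvSplit [] ip.toList)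
      (pvSplit_dotfree ip.toList [] (by simp)) 0 0 0 (pvSplit_ne_nil _ _)
    rw [pvUnsplit_pvSplit ip.toList []] at this
    simpa using this
  rw [hB]
  rcases hs : pvSplit [] ip.toList with - | ⟨p1, ps1⟩
  · exact absurd hs (pvSplit_ne_nil _ _)
  rcases ps1 with - | ⟨p2, ps2⟩
  · rw [pvScanParts_short _ 0 0 0 (by simp)]
  rcases ps2 with - | ⟨p3, ps3⟩
  · rw [pvScanParts_short _ 0 0 0 (by simp)]
  rcases ps3 with - | ⟨p4, ps4⟩
  · rw [pvScanParts_short _ 0 0 0 (by simp)]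
  rcases ps4 with - | ⟨p5, ps5⟩
  · -- exactly four parts
    rcases h1 : pvOctet? p1 with - | v1
    · simp [pvScanParts, h1]
    rcases h2 : pvOctet? p2 with - | v2
    · simp [pvScanParts, h1, h2]
    rcases h3 : pvOctet? p3 with - | v3
    · simp [pvScanParts, h1, h2, h3]
    rcases h4 : pvOctet? p4 with - | v4
    · simp [pvScanParts, h1, h2, h3, h4]
    have b1 := pvOctet?_le h1
    have b2 := pvOctet?_le h2
    have b3 := pvOctet?_le h3
    have b4 := pvOctet?_le h4
    simp only [pvScanParts, h1, h2, h3, h4]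
    norm_num
    simp only [← Bool.decide_and, ← Bool.decide_or]
    exact decide_eq_decide.mpr (by constructor <;> intro h <;> omega)
  · rw [pvScanParts_short _ 0 0 0 (by simp)]
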